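-- pv_equiv track=rewrite | github.com/rwinklerwilkes/AoC2023 | day18.py | determine_inside
-- ===== SOURCE A (Python) =====
-- def determine_inside(filled, row, col):
--     edges = 0
--     while col >= 0:
--         if (row, col) in filled:
--             edges += 1
--         col -= 1
--     if edges % 2 == 0:
--         return False
--     else:
--         return True
-- ===== SOURCE B (Python) =====
-- def determine_inside(filled, row, col):
--     cols = {c for (r, c) in filled if r == row and 0 <= c <= col}
--     return len(cols) % 2 == 1
-- ===== Notes on version B (the rewrite author's own statement) =====
-- stated objective: faster
-- what changed: Instead of scanning every column from col down to 0 with a membership probe of (row, c) in filled per column, B makes one pass over filled itself, collecting the set of distinct in-range columns on the target row and returning whether its size is odd.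
import Mathlib
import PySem

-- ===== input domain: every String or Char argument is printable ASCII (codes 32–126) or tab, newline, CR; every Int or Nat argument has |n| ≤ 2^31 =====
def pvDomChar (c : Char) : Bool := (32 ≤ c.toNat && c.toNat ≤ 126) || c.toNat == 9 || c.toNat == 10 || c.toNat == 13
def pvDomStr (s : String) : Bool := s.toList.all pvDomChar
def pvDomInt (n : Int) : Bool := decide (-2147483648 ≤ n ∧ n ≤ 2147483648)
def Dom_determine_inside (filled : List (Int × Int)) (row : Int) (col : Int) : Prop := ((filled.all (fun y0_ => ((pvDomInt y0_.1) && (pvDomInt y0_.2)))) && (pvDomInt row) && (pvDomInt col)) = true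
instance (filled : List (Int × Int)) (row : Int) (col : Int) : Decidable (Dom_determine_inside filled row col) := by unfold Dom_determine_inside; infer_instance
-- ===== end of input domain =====

-- B replaces A's scan of all columns col..0 (a membership probe per column) by one pass
-- over `filled`, collecting the set of distinct in-range columns of the row (objective: faster — O(|filled|) instead of O(col·|filled|)).

-- ===== PORT A =====
-- the while loop of A: state (col, edges); one iteration per column while col >= 0
def determineInsideLoopA (filled : List (Int × Int)) (row : Int) : Int → Int → Int
  | col, edges =>
    if h : col ≥ 0 then
      determineInsideLoopA filled row (col - 1)
        (if (row, col) ∈ filled then edges + 1 else edges)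
    else
      edges
  termination_by col _ => (col + 1).toNat
  decreasing_by omega

def determine_inside (filled : List (Int × Int)) (row : Int) (col : Int) : Bool :=
  let edges := determineInsideLoopA filled row col 0
  if edges % 2 = 0 then false else true

-- ===== PORT B =====
def determine_inside_alt (filled : List (Int × Int)) (row : Int) (col : Int) : Bool :=
  -- cols = {c for (r, c) in filled if r == row and 0 <= c <= col}
  let cols : PySem.Set Int :=
    PySem.Set.ofList (filled.filterMap
      (fun p => if p.1 = row ∧ 0 ≤ p.2 ∧ p.2 ≤ col then some p.2 else none))
  -- len(cols) % 2 == 1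
  (PySem.Set.len cols) % 2 == 1

-- ===== PRECONDITION & SPEC =====
def Spec_determine_inside (filled : List (Int × Int)) (row : Int) (col : Int) (out : Bool) : Prop := out = determine_inside_alt filled row col
instance (filled : List (Int × Int)) (row : Int) (col : Int) (out : Bool) : Decidable (Spec_determine_inside filled row col out) := by unfold Spec_determine_inside; infer_instance

-- ===== CLAIM (what is proved, stated in full; the proofs are below) =====
def Claim_equal_determine_inside : Prop := ∀ (filled : List (Int × Int)) (row : Int) (col : Int), Dom_determine_inside filled row col → Spec_determine_inside filled row col (determine_inside filled row col)

-- ===== LEMMAS AND PROOFS =====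

-- the number of columns A's loop counts, as a finite set
noncomputable def pvColsFinset (filled : List (Int × Int)) (row : Int) (col : Int) : Finset Int :=
  (Finset.Icc 0 col).filter (fun c => (row, c) ∈ filled)

theorem determineInsideLoopA_eq (filled : List (Int × Int)) (row : Int) :
    ∀ (col edges : Int),
      determineInsideLoopA filled row col edges
        = edges + (pvColsFinset filled row col).card := by
  intro col edges
  induction col, edges using determineInsideLoopA.induct filled row with
  | case1 col edges h ih =>
    rw [determineInsideLoopA, dif_pos h]
    simp only [dite_eq_ite] at ih
    rw [ih]
    have hmem : col ∉ (Finset.Icc (0:Int) (col - 1)) := by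
      simp [Finset.mem_Icc]
    have hins : Finset.Icc (0:Int) col = insert col (Finset.Icc 0 (col - 1)) := by
      ext x; simp [Finset.mem_Icc, Finset.mem_insert]; omega
    unfold pvColsFinset
    rw [hins, Finset.filter_insert]
    by_cases hc : (row, col) ∈ filled
    · rw [if_pos hc, if_pos hc,
        Finset.card_insert_of_notMem (fun hx => hmem (Finset.mem_of_mem_filter _ hx))]
      push_cast; ring
    · rw [if_neg hc, if_neg hc]
  | case2 col edges h =>
    rw [determineInsideLoopA, dif_neg h]
    have : Finset.Icc (0:Int) col = ∅ := by
      apply Finset.Icc_eq_empty; omega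
    simp [pvColsFinset, this]

theorem pvAltLen_eq (filled : List (Int × Int)) (row : Int) (col : Int) :
    (PySem.Set.len (PySem.Set.ofList (filled.filterMap
      (fun p => if p.1 = row ∧ 0 ≤ p.2 ∧ p.2 ≤ col then some p.2 else none))) : Int)
      = ((pvColsFinset filled row col).card : Int) := by
  set l := filled.filterMap
      (fun p => if p.1 = row ∧ 0 ≤ p.2 ∧ p.2 ≤ col then some p.2 else none) with hl
  have hnd : (PySem.Set.ofList l).Nodup := PySem.Set.nodup_ofList l
  have hlen : (PySem.Set.ofList l).length = (PySem.Set.ofList l).toFinset.card :=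
    (List.toFinset_card_of_nodup hnd).symm
  have hset : (PySem.Set.ofList l).toFinset = pvColsFinset filled row col := by
    ext c
    simp only [List.mem_toFinset, PySem.Set.mem_ofList, hl, List.mem_filterMap,
      pvColsFinset, Finset.mem_filter, Finset.mem_Icc]
    constructor
    · rintro ⟨⟨r, c'⟩, hp, hif⟩
      by_cases hcond : r = row ∧ 0 ≤ c' ∧ c' ≤ col
      · rw [if_pos hcond] at hif
        obtain ⟨h1, h2, h3⟩ := hcond
        cases hif
        exact ⟨⟨h2, h3⟩, h1 ▸ hp⟩
      · rw [if_neg hcond] at hif; cases hif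
    · rintro ⟨⟨h0, h1⟩, hmem⟩
      exact ⟨(row, c), hmem, by rw [if_pos ⟨rfl, h0, h1⟩]⟩
  simp [PySem.Set.len, hlen, hset]

theorem determine_inside_spec : Claim_equal_determine_inside := by
  intro filled row col _
  unfold Spec_determine_inside determine_inside determine_inside_alt
  rw [determineInsideLoopA_eq]
  simp only [zero_add]
  rw [show (PySem.Set.len (PySem.Set.ofList (filled.filterMap
      (fun p => if p.1 = row ∧ 0 ≤ p.2 ∧ p.2 ≤ col then some p.2 else none))) : Int)
      = ((pvColsFinset filled row col).card : Int) from pvAltLen_eq filled row col]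
  set n : Int := ((pvColsFinset filled row col).card : Int)
  by_cases h : n % 2 = 0
  · simp [h]
  · simp [h]; omega
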